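-- pv_equiv track=rewrite | github.com/yuriolv/MetaHeuristics | PSO/MLP.py | kill_layers
-- ===== SOURCE A (Python) =====
-- def kill_layers(vet):
--     count = 0
--     for layer in range(len(vet)-1, 2, -3):
--         if not (vet[layer] and vet[layer-2]):
--             count += 1
--             vet.pop(layer)
--             vet.pop(layer-1)
--             vet.pop(layer-2)
--
--     for i in range(count*3):
--       vet.append(0)
--     return vet
-- ===== SOURCE B (Python) =====
-- def kill_layers(vet):
--     n = len(vet)
--     if n < 3:
--         return vet
--     p = n % 3 or 3
--     out = vet[:p]
--     for i in range(p, n, 3):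
--         if vet[i] and vet[i + 2]:
--             out.extend(vet[i:i + 3])
--     out.extend([0] * (n - len(out)))
--     vet[:] = out
--     return vet
-- ===== Notes on version B (the rewrite author's own statement) =====
-- stated objective: alternative
-- what changed: A repeatedly pops three elements from inside the list (each pop shifts the tail) while scanning triple indices backwards; B makes one forward pass over the triples, rebuilding the list from the kept triples and padding with zeros to the original length; it avoids A's quadratic worst case when many triples are removed, but on inputs with few removals the measured cost is the same.
import Mathlib
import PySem

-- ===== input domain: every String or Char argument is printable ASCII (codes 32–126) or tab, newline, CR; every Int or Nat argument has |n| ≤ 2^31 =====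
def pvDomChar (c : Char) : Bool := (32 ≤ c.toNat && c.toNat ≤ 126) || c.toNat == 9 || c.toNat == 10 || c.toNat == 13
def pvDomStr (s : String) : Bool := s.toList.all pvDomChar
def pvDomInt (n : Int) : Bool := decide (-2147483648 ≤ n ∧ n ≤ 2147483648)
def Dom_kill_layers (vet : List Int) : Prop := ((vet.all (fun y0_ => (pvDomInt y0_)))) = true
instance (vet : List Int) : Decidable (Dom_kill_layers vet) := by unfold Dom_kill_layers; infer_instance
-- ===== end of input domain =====

-- B replaces A's backward scan with in-place triple pops by a single forward pass that rebuilds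
-- the list from the kept triples and pads with zeros; A mutates its argument in place (B performs
-- the same final mutation via vet[:] = out), the equivalence proved here is about the RETURN value.

-- ===== PORT A =====
-- one iteration of A's first loop: state (vet, count), layer the running index
def klStep (st : List Int × Int) (layer : Int) : List Int × Int :=
  match st with
  | (vet, count) =>
    match PySem.List.pyGet? vet layer, PySem.List.pyGet? vet (layer - 2) with
    | some c, some a =>
      if ¬ (c ≠ 0 ∧ a ≠ 0) then
        -- vet.pop(layer); vet.pop(layer-1); vet.pop(layer-2)  (indices always valid in A's loop)
        match PySem.List.pop? vet layer with
        | some (_, v1) =>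
          match PySem.List.pop? v1 (layer - 1) with
          | some (_, v2) =>
            match PySem.List.pop? v2 (layer - 2) with
            | some (_, v3) => (v3, count + 1)
            | none => (v2, count + 1)
          | none => (v1, count + 1)
        | none => (vet, count + 1)
      else (vet, count)
    | _, _ => (vet, count)

def kill_layers (vet : List Int) : List Int :=
  let st := (PySem.List.pyRange ((vet.length : Int) - 1) 2 (-3)).foldl klStep (vet, 0)
  (PySem.List.pyRange 0 (st.2 * 3) 1).foldl (fun w _ => w ++ [0]) st.1

-- ===== PORT B =====
def kill_layers_alt (vet : List Int) : List Int :=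
  let n := vet.length
  if n < 3 then vet
  else
    let p : Nat := if n % 3 = 0 then 3 else n % 3          -- p = n % 3 or 3
    let out0 := PySem.List.slice vet none (some (p : Int))  -- vet[:p]
    let out := (PySem.List.pyRange (p : Int) (n : Int) 3).foldl
      (fun out i =>
        -- vet[i] / vet[i+2]: i is always in range here, so xs[i] is pyGetD
        if PySem.List.pyGetD vet i 0 ≠ 0 ∧ PySem.List.pyGetD vet (i + 2) 0 ≠ 0 then
          out ++ PySem.List.slice vet (some i) (some (i + 3))
        else out) out0
    out ++ List.replicate (n - out.length) 0

-- ===== PRECONDITION & SPEC =====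
def Spec_kill_layers (vet : List Int) (out : List Int) : Prop := out = kill_layers_alt vet
instance (vet : List Int) (out : List Int) : Decidable (Spec_kill_layers vet out) := by unfold Spec_kill_layers; infer_instance

-- ===== CLAIM (what is proved, stated in full; the proofs are below) =====
def Claim_equal_kill_layers : Prop := ∀ (vet : List Int), Dom_kill_layers vet → Spec_kill_layers vet (kill_layers vet)

-- ===== LEMMAS AND PROOFS =====

-- a triple is kept iff its first and third components are nonzero
def keepT (t : Int × Int × Int) : Bool := decide (t.1 ≠ 0 ∧ t.2.2 ≠ 0)

def flatT (ts : List (Int × Int × Int)) : List Int := ts.flatMap (fun t => [t.1, t.2.1, t.2.2])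

def chunk3 : List Int → List (Int × Int × Int)
  | a :: b :: c :: r => (a, b, c) :: chunk3 r
  | _ => []

theorem length_flatT (ts : List (Int × Int × Int)) : (flatT ts).length = 3 * ts.length := by
  induction ts with
  | nil => simp [flatT]
  | cons t r ih => simp [flatT] at ih ⊢; omega

theorem flatT_chunk3 (l : List Int) (h : l.length % 3 = 0) : flatT (chunk3 l) = l := by
  match l with
  | [] => simp [chunk3, flatT]
  | [a] => simp at h
  | [a, b] => simp at h
  | a :: b :: c :: r =>
    have ih := flatT_chunk3 r (by simp at h; omega)
    simp only [chunk3, flatT] at ih ⊢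
    simp [ih]

theorem pyRange_neg3_nil (a : Int) (h : a ≤ 2) : PySem.List.pyRange a 2 (-3) = [] := by
  simp [PySem.List.pyRange]
  omega

theorem pyRange_neg3_cons (a : Int) (h : 2 < a) :
    PySem.List.pyRange a 2 (-3) = a :: PySem.List.pyRange (a - 3) 2 (-3) := by
  simp [PySem.List.pyRange]
  rw [if_pos h]
  by_cases h5 : 2 < a - 3
  · rw [if_pos h5]
    have : ((a - 2 + 3 - 1) / 3).toNat = ((a - 3 - 2 + 3 - 1) / 3).toNat + 1 := by omega
    rw [this, List.range_succ_eq_map]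
    simp [List.map_map]
    intro k _
    ring
  · rw [if_neg h5]
    have : ((a - 2 + 3 - 1) / 3).toNat = 1 := by omega
    rw [this]
    simp

theorem pyRange_three_nil (a b : Int) (h : b ≤ a) : PySem.List.pyRange a b 3 = [] := by
  simp [PySem.List.pyRange]
  omega

theorem pyRange_three_cons (a b : Int) (h : a < b) :
    PySem.List.pyRange a b 3 = a :: PySem.List.pyRange (a + 3) b 3 := by
  simp [PySem.List.pyRange]
  rw [if_pos h]
  by_cases h5 : a + 3 < b
  · rw [if_pos h5]
    have : ((b - a + 3 - 1) / 3).toNat = ((b - (a+3) + 3 - 1) / 3).toNat + 1 := by omega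
    rw [this, List.range_succ_eq_map]
    simp [List.map_map]
    intro k _
    ring
  · rw [if_neg h5]
    have : ((b - a + 3 - 1) / 3).toNat = 1 := by omega
    rw [this]
    simp

theorem klStep_shift (v : List Int) (c : Int) (x : Int) :
    klStep (v, c) x = ((klStep (v, 0) x).1, c + (klStep (v, 0) x).2) := by
  simp only [klStep]
  rcases h1 : PySem.List.pyGet? v x with _ | cc <;> rcases h2 : PySem.List.pyGet? v (x - 2) with _ | aa <;> simp
  split
  · rcases h3 : PySem.List.pop? v x with _ | ⟨_, v1⟩ <;> simp
    rcases h4 : PySem.List.pop? v1 (x - 1) with _ | ⟨_, v2⟩ <;> simp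
    rcases h5 : PySem.List.pop? v2 (x - 2) with _ | ⟨_, v3⟩ <;> simp
  · simp

theorem foldl_klStep_shift (L : List Int) (v : List Int) (c : Int) :
    L.foldl klStep (v, c) = ((L.foldl klStep (v, 0)).1, c + (L.foldl klStep (v, 0)).2) := by
  induction L generalizing v c with
  | nil => simp
  | cons x L ih =>
    simp only [List.foldl_cons]
    rw [klStep_shift, ih, ih ((klStep (v, 0) x).1) ((klStep (v, 0) x).2)]
    simp [add_assoc]

theorem loopA (ts : List (Int × Int × Int)) (u tail : List Int)
    (h1 : 1 ≤ u.length) (h2 : u.length ≤ 3) :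
    (PySem.List.pyRange ((u.length : Int) + 3 * ts.length - 1) 2 (-3)).foldl klStep
        (u ++ flatT ts ++ tail, 0)
      = (u ++ flatT (ts.filter keepT) ++ tail,
         (ts.length : Int) - (ts.filter keepT).length) := by
  induction ts using List.reverseRecOn generalizing tail with
  | nil =>
    rw [pyRange_neg3_nil _ (by simp; omega)]
    simp [flatT]
  | append_singleton ts' t ih =>
    obtain ⟨a, bb, cc⟩ := t
    have hm : ((u.length : Int) + 3 * (ts' ++ [(a, bb, cc)]).length - 1)
        = ((u.length + 3 * ts'.length + 2 : Nat) : Int) := by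
      simp; ring
    set m : Nat := u.length + 3 * ts'.length with hmdef
    have hflat : flatT (ts' ++ [(a, bb, cc)]) = flatT ts' ++ [a, bb, cc] := by
      simp [flatT]
    have hw : (u ++ flatT ts').length = m := by
      simp [length_flatT]; omega
    rw [hm, pyRange_neg3_cons _ (by push_cast; omega), List.foldl_cons]
    have hre : u ++ flatT (ts' ++ [(a, bb, cc)]) ++ tail
        = (u ++ flatT ts') ++ ([a, bb, cc] ++ tail) := by
      rw [hflat]; simp
    rw [hre]
    -- evaluate klStep at layer = m + 2
    have hget2 : PySem.List.pyGet? ((u ++ flatT ts') ++ ([a, bb, cc] ++ tail)) ((m + 2 : Nat) : Int)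
        = some cc := by
      rw [PySem.List.pyGet?_natCast, List.getElem?_append_right (by omega)]
      simp [hw]
    have hget0 : PySem.List.pyGet? ((u ++ flatT ts') ++ ([a, bb, cc] ++ tail)) (((m + 2 : Nat) : Int) - 2)
        = some a := by
      have : ((m + 2 : Nat) : Int) - 2 = ((m : Nat) : Int) := by push_cast; ring
      rw [this, PySem.List.pyGet?_natCast, List.getElem?_append_right (by omega)]
      simp [hw]
    have hrest : ((m + 2 : Nat) : Int) - 3 = (u.length : Int) + 3 * ts'.length - 1 := by
      push_cast; omega
    by_cases hk : cc ≠ 0 ∧ a ≠ 0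
    · -- triple kept
      have hstep : klStep ((u ++ flatT ts') ++ ([a, bb, cc] ++ tail), 0) ((m + 2 : Nat) : Int)
          = ((u ++ flatT ts') ++ ([a, bb, cc] ++ tail), 0) := by
        simp only [klStep, hget2, hget0]
        rw [if_neg (by simpa using hk)]
      rw [hstep, hrest, ih ([a, bb, cc] ++ tail)]
      have hkeep : keepT (a, bb, cc) = true := by
        simp [keepT]; exact ⟨hk.2, hk.1⟩
      rw [List.filter_append]
      simp [hkeep, flatT]
    · -- triple removed
      have e2 : ((u ++ flatT ts') ++ ([a, bb, cc] ++ tail)).eraseIdx (m + 2)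
          = (u ++ flatT ts') ++ (a :: bb :: tail) := by
        rw [List.eraseIdx_append_of_length_le (by omega)]
        simp [hw]
      have e1 : ((u ++ flatT ts') ++ (a :: bb :: tail)).eraseIdx (m + 1)
          = (u ++ flatT ts') ++ (a :: tail) := by
        rw [List.eraseIdx_append_of_length_le (by omega)]
        simp [hw]
      have e0 : ((u ++ flatT ts') ++ (a :: tail)).eraseIdx m
          = (u ++ flatT ts') ++ tail := by
        rw [List.eraseIdx_append_of_length_le (by omega)]
        simp [hw]
      have hp2 : PySem.List.pop? ((u ++ flatT ts') ++ ([a, bb, cc] ++ tail)) ((m + 2 : Nat) : Int)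
          = some ((((u ++ flatT ts') ++ ([a, bb, cc] ++ tail)))[m+2]'(by simp [length_flatT]; omega),
                  (u ++ flatT ts') ++ (a :: bb :: tail)) := by
        rw [PySem.List.pop?_natCast _ _ (by simp [length_flatT]; omega), e2]
      have hp1 : PySem.List.pop? ((u ++ flatT ts') ++ (a :: bb :: tail)) (((m + 2 : Nat) : Int) - 1)
          = some ((((u ++ flatT ts') ++ (a :: bb :: tail)))[m+1]'(by simp [length_flatT]; omega),
                  (u ++ flatT ts') ++ (a :: tail)) := by
        have : ((m + 2 : Nat) : Int) - 1 = ((m + 1 : Nat) : Int) := by push_cast; ring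
        rw [this, PySem.List.pop?_natCast _ _ (by simp [length_flatT]; omega), e1]
      have hp0 : PySem.List.pop? ((u ++ flatT ts') ++ (a :: tail)) (((m + 2 : Nat) : Int) - 2)
          = some ((((u ++ flatT ts') ++ (a :: tail)))[m]'(by simp [length_flatT]; omega),
                  (u ++ flatT ts') ++ tail) := by
        have : ((m + 2 : Nat) : Int) - 2 = ((m : Nat) : Int) := by push_cast; ring
        rw [this, PySem.List.pop?_natCast _ _ (by simp [length_flatT]; omega), e0]
      have hstep : klStep ((u ++ flatT ts') ++ ([a, bb, cc] ++ tail), 0) ((m + 2 : Nat) : Int)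
          = ((u ++ flatT ts') ++ tail, 1) := by
        simp only [klStep, hget2, hget0]
        rw [if_pos (by simpa using hk)]
        simp only [hp2, hp1, hp0]
        norm_num
      rw [hstep, hrest, foldl_klStep_shift, ih tail]
      have hkeep : keepT (a, bb, cc) = false := by
        simp [keepT]; tauto
      rw [List.filter_append]
      simp [hkeep]
      have := List.length_filter_le keepT ts'
      omega

theorem loopB (vet : List Int) (ts : List (Int × Int × Int)) (i : Nat) (out : List Int)
    (hd : vet.drop i = flatT ts) (hn : vet.length = i + 3 * ts.length) :
    (PySem.List.pyRange (i : Int) (vet.length : Int) 3).foldl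
      (fun out j =>
        if PySem.List.pyGetD vet j 0 ≠ 0 ∧ PySem.List.pyGetD vet (j + 2) 0 ≠ 0 then
          out ++ PySem.List.slice vet (some j) (some (j + 3))
        else out) out
    = out ++ flatT (ts.filter keepT) := by
  induction ts generalizing i out with
  | nil =>
    rw [pyRange_three_nil _ _ (by simp [hn])]
    simp [flatT]
  | cons t ts' ih =>
    obtain ⟨a, bb, cc⟩ := t
    have hcons : vet.drop i = a :: bb :: cc :: flatT ts' := by
      simpa [flatT] using hd
    have hlen : i + 3 ≤ vet.length := by simp only [List.length_cons] at hn; omega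
    have g0 : vet[i]? = some a := by
      have h0 : (vet.drop i)[0]? = some a := by rw [hcons]; rfl
      rw [List.getElem?_drop] at h0; simpa using h0
    have g2 : vet[i + 2]? = some cc := by
      have h0 : (vet.drop i)[2]? = some cc := by rw [hcons]; rfl
      rw [List.getElem?_drop] at h0; simpa using h0
    have hg0 : PySem.List.pyGetD vet (i : Int) 0 = a := by
      rw [PySem.List.pyGetD_natCast, List.getD_eq_getElem?_getD, g0]; rfl
    have hg2 : PySem.List.pyGetD vet ((i : Int) + 2) 0 = cc := by
      have hc : ((i : Int) + 2) = ((i + 2 : Nat) : Int) := by push_cast; ring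
      rw [hc, PySem.List.pyGetD_natCast, List.getD_eq_getElem?_getD, g2]; rfl
    have hslice : PySem.List.slice vet (some (i : Int)) (some ((i : Int) + 3)) = [a, bb, cc] := by
      have h3 : ((i : Int) + 3) = ((i : Int) + ((3 : Nat) : Int)) := by norm_num
      rw [h3, PySem.List.slice_natCast_add]
      rw [hcons]
      rfl
    have hdrop' : vet.drop (i + 3) = flatT ts' := by
      have : vet.drop (i + 3) = (vet.drop i).drop 3 := by
        rw [List.drop_drop]
      rw [this, hcons]; rfl
    have hstep3 : ((i : Int) + 3) = ((i + 3 : Nat) : Int) := by push_cast; ring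
    have hlt : (i : Int) < (vet.length : Int) := by
      simp only [List.length_cons] at hn; push_cast [hn]; omega
    rw [pyRange_three_cons _ _ hlt, List.foldl_cons, hstep3]
    by_cases hk : a ≠ 0 ∧ cc ≠ 0
    · rw [if_pos (by rw [hg0, hg2]; exact hk)]
      rw [ih (i + 3) _ hdrop' (by simp only [List.length_cons] at hn; omega)]
      have hkeep : keepT (a, bb, cc) = true := by simp [keepT]; exact hk
      simp [hkeep, flatT, hslice]
    · rw [if_neg (by rw [hg0, hg2]; exact hk)]
      rw [ih (i + 3) _ hdrop' (by simp only [List.length_cons] at hn; omega)]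
      have hkeep : keepT (a, bb, cc) = false := by simp [keepT]; tauto
      simp [hkeep]

-- ===== VERDICT (by name: the statement is the Claim_ definition above) =====
theorem kill_layers_spec : Claim_equal_kill_layers := by
  unfold Claim_equal_kill_layers Spec_kill_layers
  intro vet _
  by_cases hlt : vet.length < 3
  · have hA : kill_layers vet = vet := by
      unfold kill_layers
      rw [pyRange_neg3_nil _ (by omega)]
      simp [PySem.List.pyRange]
    have hB : kill_layers_alt vet = vet := by
      unfold kill_layers_alt
      rw [if_pos hlt]
    rw [hA, hB]
  · rw [not_lt] at hlt
    set n := vet.length with hn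
    set p : Nat := if n % 3 = 0 then 3 else n % 3 with hp
    have hp13 : 1 ≤ p ∧ p ≤ 3 := by rw [hp]; split <;> omega
    have hpn : p ≤ n := by rw [hp]; split <;> omega
    have hmod : (n - p) % 3 = 0 := by rw [hp]; split <;> omega
    have hrestlen : (vet.drop p).length = n - p := by simp [hn]
    have hflat : flatT (chunk3 (vet.drop p)) = vet.drop p :=
      flatT_chunk3 _ (by rw [hrestlen]; exact hmod)
    set ts := chunk3 (vet.drop p) with hts
    set u := vet.take p with hu
    have hulen : u.length = p := by simp [hu]; omega
    have hsplit : vet = u ++ flatT ts := by rw [hflat, hu]; simp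
    have htslen : 3 * ts.length = n - p := by
      have h1 := length_flatT ts
      rw [hflat, hrestlen] at h1
      omega
    have hfilter := List.length_filter_le keepT ts
    -- A side
    have hbound : (n : Int) - 1 = (u.length : Int) + 3 * (ts.length : Int) - 1 := by
      push_cast [hulen]; omega
    have hA : kill_layers vet
        = (u ++ flatT (ts.filter keepT))
          ++ List.replicate ((((ts.length : Int) - ((ts.filter keepT).length : Int)) * 3).toNat) 0 := by
      unfold kill_layers
      rw [← hn, hbound]
      have hinit : (vet, (0 : Int)) = (u ++ flatT ts ++ [], 0) := by
        rw [List.append_nil, ← hsplit]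
      rw [hinit, loopA ts u [] (by omega) (by omega)]
      rw [PySem.List.foldl_append_singleton_eq_map]
      simp [PySem.List.pyRange_one, Function.comp_def, List.map_const']
    -- B side
    have hB : kill_layers_alt vet
        = (u ++ flatT (ts.filter keepT))
          ++ List.replicate (n - (u ++ flatT (ts.filter keepT)).length) 0 := by
      unfold kill_layers_alt
      rw [if_neg (by omega)]
      show ((PySem.List.pyRange ((p : Nat) : Int) ((n : Nat) : Int) 3).foldl
          (fun out i =>
            if PySem.List.pyGetD vet i 0 ≠ 0 ∧ PySem.List.pyGetD vet (i + 2) 0 ≠ 0 then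
              out ++ PySem.List.slice vet (some i) (some (i + 3))
            else out)
          (PySem.List.slice vet none (some ((p : Nat) : Int))))
        ++ List.replicate (n - ((PySem.List.pyRange ((p : Nat) : Int) ((n : Nat) : Int) 3).foldl
          (fun out i =>
            if PySem.List.pyGetD vet i 0 ≠ 0 ∧ PySem.List.pyGetD vet (i + 2) 0 ≠ 0 then
              out ++ PySem.List.slice vet (some i) (some (i + 3))
            else out)
          (PySem.List.slice vet none (some ((p : Nat) : Int)))).length) 0 = _
      have hslice : PySem.List.slice vet none (some ((p : Nat) : Int)) = u := by
        rw [PySem.List.slice_to_natCast, hu]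
      rw [hslice, loopB vet ts p u (by rw [hflat]) (by omega)]
    rw [hA, hB]
    have hlenout : (u ++ flatT (ts.filter keepT)).length = p + 3 * (ts.filter keepT).length := by
      simp [hulen, length_flatT]
    rw [hlenout]
    congr 1
    congr 1
    omega
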